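-- pv_equiv track=rewrite | github.com/MrBrantCode/unitest_baseline | mut_generate/mist_train_cf/cf_56858/solution.py | shortestDistanceToTargetColor
-- ===== SOURCE A (Python) =====
-- import bisect
--
-- def shortestDistanceToTargetColor(colors, queries):
--     color_indices = [ [], [], [] ]
--     for i, color in enumerate(colors):
--         color_indices[color-1].append(i)
--
--     res = []
--     for i, color in queries:
--         color_ind = color_indices[color-1]
--         if not color_ind:
--             res.append(-1)
--             continue
--         pos = bisect.bisect_left(color_ind, i)
--         if pos == len(color_ind):
--             closest = abs(color_ind[pos-1] - i)
--         elif pos == 0: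
--             closest = abs(color_ind[pos] - i)
--         else:
--             closest = min(abs(color_ind[pos] - i), abs(color_ind[pos-1] - i))
--         res.append(closest)
--
--     return res
-- ===== SOURCE B (Python) =====
-- def shortestDistanceToTargetColor(colors, queries):
--     idx = [[], [], []]
--     for j, c in enumerate(colors):
--         idx[c - 1].append(j)
--     return [min((abs(j - i) for j in idx[color - 1]), default=-1)
--             for i, color in queries]
-- ===== Notes on version B (the rewrite author's own statement) =====
-- stated objective: simpler
-- what changed: Groups occurrence indices per color as A does, but answers each query with min(abs(j - i) for j in the color's index list, default=-1) instead of bisect_left followed by three positional boundary cases; Pre_ excludes only inputs on which the color-1 list index is out of range and both programs raise IndexError.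
import Mathlib
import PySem

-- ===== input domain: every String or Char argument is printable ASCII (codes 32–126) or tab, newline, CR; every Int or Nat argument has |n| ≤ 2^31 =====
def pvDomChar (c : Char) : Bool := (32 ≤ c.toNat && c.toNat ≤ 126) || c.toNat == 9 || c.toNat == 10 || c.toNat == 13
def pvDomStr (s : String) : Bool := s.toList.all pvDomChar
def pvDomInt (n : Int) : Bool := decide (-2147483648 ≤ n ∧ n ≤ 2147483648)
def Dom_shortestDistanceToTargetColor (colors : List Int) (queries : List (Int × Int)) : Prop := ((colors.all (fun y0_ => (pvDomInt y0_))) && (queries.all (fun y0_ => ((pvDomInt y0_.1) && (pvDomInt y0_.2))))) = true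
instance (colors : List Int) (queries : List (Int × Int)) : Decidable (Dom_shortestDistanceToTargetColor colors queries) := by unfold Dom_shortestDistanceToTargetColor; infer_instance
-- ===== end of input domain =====

-- B groups occurrence indices per color like A but answers each query with a plain
-- min over that list's distances (default -1), instead of A's bisect binary search
-- with three positional boundary cases (simpler, not faster).


-- ===== PORT A =====
-- Python `ls[k].append(v)` on a list of lists: negative k wraps; an out-of-range k
-- raises IndexError in Python (unreachable under Pre_), modelled here as a no-op.
def pvSetAt (ls : List (List Int)) (k : Int) (v : Int) : List (List Int) :=
  let n : Int := ls.length
  let k' : Int := if k < 0 then k + n else k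
  if 0 ≤ k' ∧ k' < n then ls.set k'.toNat ((ls.getD k'.toNat []) ++ [v]) else ls

def shortestDistanceToTargetColor (colors : List Int) (queries : List (Int × Int)) : List Int :=
  let ci := (PySem.List.enumerate colors).foldl (fun ci p => pvSetAt ci (p.2 - 1) p.1) [[], [], []]
  queries.foldl (fun res q =>
    let i := q.1
    -- color_indices[color-1]: pyGet? handles the negative wraparound; `none`
    -- (IndexError) is unreachable under Pre_, defaulted to [].
    let colorInd := (PySem.List.pyGet? ci (q.2 - 1)).getD []
    if colorInd = [] then res ++ [-1]
    else
      let pos := PySem.List.bisectLeft colorInd i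
      let closest :=
        if pos = colorInd.length then |colorInd.getD (pos - 1) 0 - i|
        else if pos = 0 then |colorInd.getD pos 0 - i|
        else min (|colorInd.getD pos 0 - i|) (|colorInd.getD (pos - 1) 0 - i|)
      res ++ [closest]) []

-- ===== PORT B =====
def shortestDistanceToTargetColor_alt (colors : List Int) (queries : List (Int × Int)) : List Int :=
  -- idx[c-1].append(j): same wrapping list indexing as A's port (IndexError is
  -- unreachable under Pre_, modelled as a no-op)
  let idx := (PySem.List.enumerate colors).foldl (fun idx p => pvSetAt idx (p.2 - 1) p.1) [[], [], []]
  -- min(abs(j - i) for j in idx[color-1], default=-1)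
  queries.map (fun q =>
    (PySem.List.min? (((PySem.List.pyGet? idx (q.2 - 1)).getD []).map (fun j => |j - q.1|))
      (fun x => x)).getD (-1))

-- ===== PRECONDITION & SPEC =====
-- Pre_ holds exactly where the Python A returns: outside it (some color value or
-- query color outside [-2, 3]) the list index color-1 is out of range and both
-- Pythons raise IndexError.
def Pre_shortestDistanceToTargetColor (colors : List Int) (queries : List (Int × Int)) : Prop :=
  (∀ c ∈ colors, -2 ≤ c ∧ c ≤ 3) ∧ (∀ q ∈ queries, -2 ≤ q.2 ∧ q.2 ≤ 3)
instance (colors : List Int) (queries : List (Int × Int)) : Decidable (Pre_shortestDistanceToTargetColor colors queries) := by unfold Pre_shortestDistanceToTargetColor; infer_instance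

def pvWitness_shortestDistanceToTargetColor : List Int × (List (Int × Int)) :=
  ([1, 2, 3, 1], [(1, 3), (2, 1), (5, 2), (-2, 1)])

def Spec_shortestDistanceToTargetColor (colors : List Int) (queries : List (Int × Int)) (out : List Int) : Prop := out = shortestDistanceToTargetColor_alt colors queries
instance (colors : List Int) (queries : List (Int × Int)) (out : List Int) : Decidable (Spec_shortestDistanceToTargetColor colors queries out) := by unfold Spec_shortestDistanceToTargetColor; infer_instance

-- ===== CLAIM (what is proved, stated in full; the proofs are below) =====
def Claim_equal_shortestDistanceToTargetColor : Prop := ∀ (colors : List Int) (queries : List (Int × Int)), Dom_shortestDistanceToTargetColor colors queries → Pre_shortestDistanceToTargetColor colors queries → Spec_shortestDistanceToTargetColor colors queries (shortestDistanceToTargetColor colors queries)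

-- ===== LEMMAS AND PROOFS =====

-- A's per-query computation, factored out of its foldl for the proofs
def pvClosestA (ci : List (List Int)) (q : Int × Int) : Int :=
  let colorInd := (PySem.List.pyGet? ci (q.2 - 1)).getD []
  if colorInd = [] then -1
  else
    let pos := PySem.List.bisectLeft colorInd q.1
    if pos = colorInd.length then |colorInd.getD (pos - 1) 0 - q.1|
    else if pos = 0 then |colorInd.getD pos 0 - q.1|
    else min (|colorInd.getD pos 0 - q.1|) (|colorInd.getD (pos - 1) 0 - q.1|)

-- B's per-query computation
def pvClosestB (ci : List (List Int)) (q : Int × Int) : Int :=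
  (PySem.List.min? (((PySem.List.pyGet? ci (q.2 - 1)).getD []).map (fun j => |j - q.1|))
    (fun x => x)).getD (-1)

-- invariant of the build loop: every bucket is strictly increasing, with entries < s
def pvInv (ci : List (List Int)) (s : Int) : Prop :=
  ∀ l ∈ ci, l.Pairwise (· < ·) ∧ ∀ x ∈ l, x < s

theorem pvAppend_inv (ci : List (List Int)) (t : Nat) (s : Int) (h : pvInv ci s) :
    pvInv (ci.set t ((ci.getD t []) ++ [s])) (s + 1) := by
  intro l hl
  rcases List.mem_or_eq_of_mem_set hl with hl | hl
  · obtain ⟨hp, hb⟩ := h l hl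
    exact ⟨hp, fun x hx => by have := hb x hx; omega⟩
  · subst hl
    by_cases ht : t < ci.length
    · obtain ⟨hp, hb⟩ := h _ (List.getElem_mem ht)
      rw [List.getD_eq_getElem ci [] ht]
      constructor
      · rw [List.pairwise_append]
        exact ⟨hp, List.pairwise_singleton _ _, fun x hx y hy => by
          simp at hy; subst hy; exact hb x hx⟩
      · intro x hx
        rcases List.mem_append.mp hx with hx | hx
        · have := hb x hx; omega
        · simp at hx; omega
    · rw [List.getD_eq_default ci [] (by omega)]
      refine ⟨List.pairwise_singleton _ _, fun x hx => ?_⟩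
      simp at hx; omega

theorem pvSetAt_inv (ci : List (List Int)) (k s : Int) (h : pvInv ci s) :
    pvInv (pvSetAt ci k s) (s + 1) := by
  simp only [pvSetAt]
  set k' : Int := if k < 0 then k + (ci.length : Int) else k with hk'
  split
  · exact pvAppend_inv ci k'.toNat s h
  · exact fun l hl => ⟨(h l hl).1, fun x hx => by have := (h l hl).2 x hx; omega⟩

theorem pvBuild_inv (colors : List Int) (s : Int) (ci : List (List Int)) (h : pvInv ci s) :
    pvInv ((PySem.List.enumerate colors s).foldl (fun ci p => pvSetAt ci (p.2 - 1) p.1) ci)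
      (s + colors.length) := by
  induction colors generalizing s ci with
  | nil => simpa using h
  | cons x xs ih =>
    have hcons : PySem.List.enumerate (x :: xs) s = (s, x) :: PySem.List.enumerate xs (s + 1) := rfl
    rw [hcons, List.foldl_cons]
    have := ih (s + 1) _ (pvSetAt_inv ci (x - 1) s h)
    have harith : s + 1 + (xs.length : Int) = s + (x :: xs).length := by
      simp; omega
    rwa [harith] at this

-- the list A and B both read for a query is sorted
theorem pvOccSorted (ci : List (List Int)) (k : Int)
    (h : ∀ l ∈ ci, l.Pairwise (· < ·)) :
    ((PySem.List.pyGet? ci k).getD []).Pairwise (· ≤ ·) := by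
  cases hg : PySem.List.pyGet? ci k with
  | none => simp
  | some l =>
    have := h l (PySem.List.mem_of_pyGet?_eq_some ci hg)
    simpa [hg] using this.imp le_of_lt

def pvIsMinDist (l : List Int) (i r : Int) : Prop :=
  (∃ x ∈ l, r = |x - i|) ∧ ∀ x ∈ l, r ≤ |x - i|

theorem pvIsMinDist_uniq {l : List Int} {i r s : Int}
    (hr : pvIsMinDist l i r) (hs : pvIsMinDist l i s) : r = s := by
  obtain ⟨⟨x, hx, hrx⟩, hrle⟩ := hr
  obtain ⟨⟨y, hy, hsy⟩, hsle⟩ := hs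
  have h1 := hsle x hx
  have h2 := hrle y hy
  omega

theorem pvMin_isMin (l : List Int) (i : Int) (hne : l ≠ []) :
    pvIsMinDist l i ((PySem.List.min? (l.map (fun j => |j - i|)) (fun x => x)).getD (-1)) := by
  cases hm : PySem.List.min? (l.map (fun j => |j - i|)) (fun x => x) with
  | none =>
    rw [PySem.List.min?_eq_none_iff] at hm
    exact absurd (List.map_eq_nil_iff.mp hm) hne
  | some m =>
    have hmem := PySem.List.min?_mem hm
    have hmin := PySem.List.min?_isMin hm
    obtain ⟨x, hx, hxm⟩ := List.mem_map.mp hmem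
    refine ⟨⟨x, hx, hxm.symm⟩, fun y hy => ?_⟩
    simpa using hmin (|y - i|) (List.mem_map.mpr ⟨y, hy, rfl⟩)

theorem pvBisect_isMin (l : List Int) (i : Int) (hs : l.Pairwise (· ≤ ·)) (hne : l ≠ []) :
    pvIsMinDist l i
      (let pos := PySem.List.bisectLeft l i
       if pos = l.length then |l.getD (pos - 1) 0 - i|
       else if pos = 0 then |l.getD pos 0 - i|
       else min (|l.getD pos 0 - i|) (|l.getD (pos - 1) 0 - i|)) := by
  obtain ⟨hlen, hlt, hge⟩ := PySem.List.bisectLeft_spec l i hs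
  have hmono := List.pairwise_iff_getElem.mp hs
  have hn : 0 < l.length := List.length_pos_iff.mpr hne
  set pos := PySem.List.bisectLeft l i with hpos
  by_cases h1 : pos = l.length
  · -- all elements are < i; the last element is closest
    have hp1 : pos - 1 < l.length := by omega
    rw [if_pos h1, List.getD_eq_getElem l 0 hp1]
    have hlast : l[pos - 1] < i := hlt (pos - 1) hp1 (by omega)
    have habs : |l[pos - 1] - i| = i - l[pos - 1] := by rw [abs_of_neg (by omega)]; ring
    refine ⟨⟨l[pos - 1], List.getElem_mem _, rfl⟩, ?_⟩
    intro x hx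
    obtain ⟨j, hj, hjx⟩ := List.mem_iff_getElem.mp hx
    have hjlt : l[j] < i := hlt j hj (by omega)
    have hjle : l[j] ≤ l[pos - 1] := by
      rcases Nat.lt_or_ge j (pos - 1) with hlt' | hge'
      · exact hmono j (pos - 1) hj hp1 hlt'
      · have : j = pos - 1 := by omega
        subst this; exact le_refl _
    have e2 : |l[j] - i| = i - l[j] := by rw [abs_of_neg (by omega)]; ring
    rw [← hjx, habs, e2]
    omega
  · by_cases h0 : pos = 0
    · -- all elements are ≥ i; the first element is closest
      have hp : pos < l.length := by omega
      rw [if_neg h1, if_pos h0, List.getD_eq_getElem l 0 hp]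
      have hfirst : i ≤ l[pos] := hge pos hp (le_refl _)
      refine ⟨⟨l[pos], List.getElem_mem _, rfl⟩, ?_⟩
      intro x hx
      obtain ⟨j, hj, hjx⟩ := List.mem_iff_getElem.mp hx
      have hjge : i ≤ l[j] := hge j hj (by omega)
      have hple : l[pos] ≤ l[j] := by
        rcases Nat.lt_or_ge pos j with hlt' | hge'
        · exact hmono pos j hp hj hlt'
        · have : j = pos := by omega
          subst this; exact le_refl _
      rw [← hjx, abs_of_nonneg (by omega), abs_of_nonneg (by omega)]
      omega
    · -- the closest element is one of the two neighbours of the insertion point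
      have hp : pos < l.length := by omega
      have hp1 : pos - 1 < l.length := by omega
      rw [if_neg h1, if_neg h0, List.getD_eq_getElem l 0 hp, List.getD_eq_getElem l 0 hp1]
      have hup : i ≤ l[pos] := hge pos hp (le_refl _)
      have hdown : l[pos - 1] < i := hlt (pos - 1) hp1 (by omega)
      have habs1 : |l[pos] - i| = l[pos] - i := abs_of_nonneg (by omega)
      have habs2 : |l[pos - 1] - i| = i - l[pos - 1] := by rw [abs_of_neg (by omega)]; ring
      constructor
      · rcases min_cases (|l[pos] - i|) (|l[pos - 1] - i|) with ⟨heq, _⟩ | ⟨heq, _⟩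
        · exact ⟨l[pos], List.getElem_mem _, heq⟩
        · exact ⟨l[pos - 1], List.getElem_mem _, heq⟩
      · intro x hx
        obtain ⟨j, hj, hjx⟩ := List.mem_iff_getElem.mp hx
        rcases Nat.lt_or_ge j pos with hjlt | hjge
        · have hjle : l[j] ≤ l[pos - 1] := by
            rcases Nat.lt_or_ge j (pos - 1) with hlt' | hge'
            · exact hmono j (pos - 1) hj hp1 hlt'
            · have : j = pos - 1 := by omega
              subst this; exact le_refl _
          have hjlti : l[j] < i := by omega
          have hmin : min (|l[pos] - i|) (|l[pos - 1] - i|) ≤ |l[pos - 1] - i| := min_le_right _ _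
          have e2 : |l[j] - i| = i - l[j] := by rw [abs_of_neg (by omega)]; ring
          rw [← hjx, e2]
          omega
        · have hjgei : l[pos] ≤ l[j] := by
            rcases Nat.lt_or_ge pos j with hlt' | hge'
            · exact hmono pos j hp hj hlt'
            · have : j = pos := by omega
              subst this; exact le_refl _
          have hmin : min (|l[pos] - i|) (|l[pos - 1] - i|) ≤ |l[pos] - i| := min_le_left _ _
          have e2 : |l[j] - i| = l[j] - i := abs_of_nonneg (by omega)
          rw [← hjx, e2]
          omega

theorem pvA_fold_eq (ci : List (List Int)) (qs : List (Int × Int)) (acc : List Int) :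
    qs.foldl (fun res q =>
      let i := q.1
      let colorInd := (PySem.List.pyGet? ci (q.2 - 1)).getD []
      if colorInd = [] then res ++ [-1]
      else
        let pos := PySem.List.bisectLeft colorInd i
        let closest :=
          if pos = colorInd.length then |colorInd.getD (pos - 1) 0 - i|
          else if pos = 0 then |colorInd.getD pos 0 - i|
          else min (|colorInd.getD pos 0 - i|) (|colorInd.getD (pos - 1) 0 - i|)
        res ++ [closest]) acc = acc ++ qs.map (pvClosestA ci) := by
  induction qs generalizing acc with
  | nil => simp
  | cons q qs ih =>
    rw [List.foldl_cons, ih, List.map_cons]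
    have hstep : (let i := q.1
        let colorInd := (PySem.List.pyGet? ci (q.2 - 1)).getD []
        if colorInd = [] then acc ++ [-1]
        else
          let pos := PySem.List.bisectLeft colorInd i
          let closest :=
            if pos = colorInd.length then |colorInd.getD (pos - 1) 0 - i|
            else if pos = 0 then |colorInd.getD pos 0 - i|
            else min (|colorInd.getD pos 0 - i|) (|colorInd.getD (pos - 1) 0 - i|)
          acc ++ [closest]) = acc ++ [pvClosestA ci q] := by
      unfold pvClosestA
      by_cases he : (PySem.List.pyGet? ci (q.2 - 1)).getD [] = [] <;> simp [he]
    rw [hstep]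
    simp

theorem pvQuery_eq (ci : List (List Int)) (q : Int × Int)
    (h : ∀ l ∈ ci, l.Pairwise (· < ·)) :
    pvClosestA ci q = pvClosestB ci q := by
  unfold pvClosestA pvClosestB
  set occ := (PySem.List.pyGet? ci (q.2 - 1)).getD [] with hocc
  have hsort : occ.Pairwise (· ≤ ·) := pvOccSorted ci (q.2 - 1) h
  by_cases he : occ = []
  · simp [he, PySem.List.min?]
  · rw [if_neg he]
    exact pvIsMinDist_uniq (pvBisect_isMin occ q.1 hsort he) (pvMin_isMin occ q.1 he)

-- ===== VERDICT (by name: the statement is the Claim_ definition above) =====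
theorem shortestDistanceToTargetColor_spec : Claim_equal_shortestDistanceToTargetColor := by
  intro colors queries _ _
  unfold Spec_shortestDistanceToTargetColor shortestDistanceToTargetColor
    shortestDistanceToTargetColor_alt
  rw [pvA_fold_eq, List.nil_append]
  refine List.map_congr_left (fun q _ => pvQuery_eq _ q (fun l hl => ?_))
  have hinv : pvInv [[], [], []] 0 := by intro l hl; fin_cases hl <;> simp
  exact ((pvBuild_inv colors 0 [[], [], []] hinv) l hl).1
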